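-- pv_equiv track=rewrite | github.com/viditkbhatnagar/loan-origination-system | models/association_mining.py | _generate_persona_name
-- ===== SOURCE A (Python) =====
-- def _generate_persona_name(pattern):
--     """Generate a descriptive name for a persona pattern"""
--     pattern_list = list(pattern)
--
--     # Extract key characteristics
--     age_terms = [p for p in pattern_list if p.startswith('Age_')]
--     income_terms = [p for p in pattern_list if p.startswith('Income_')]
--     occupation_terms = [p for p in pattern_list if p.startswith('PI_OCCUPATION_')]
--     zone_terms = [p for p in pattern_list if p.startswith('ZONE_')]
--
--     name_parts = []
--
--     if age_terms:
--         age = age_terms[0].replace('Age_', '')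
--         name_parts.append(age)
--
--     if income_terms:
--         income = income_terms[0].replace('Income_', '')
--         name_parts.append(income + ' Income')
--
--     if occupation_terms:
--         occupation = occupation_terms[0].replace('PI_OCCUPATION_', '').replace('_', ' ')
--         name_parts.append(occupation)
--
--     if zone_terms:
--         zone = zone_terms[0].replace('ZONE_', '')
--         name_parts.append(zone + ' Zone')
--
--     if name_parts:
--         return ' '.join(name_parts[:2])  # Limit to 2 main characteristics
--     else:
--         return f"Customer Segment"
-- ===== SOURCE B (Python) =====
-- def _generate_persona_name(pattern):
--     """Generate a descriptive name for a persona pattern (single pass)."""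
--     age = income = occupation = zone = None
--     for p in pattern:
--         if age is None and p.startswith('Age_'):
--             age = p.replace('Age_', '')
--         if income is None and p.startswith('Income_'):
--             income = p.replace('Income_', '') + ' Income'
--         if occupation is None and p.startswith('PI_OCCUPATION_'):
--             occupation = p.replace('PI_OCCUPATION_', '').replace('_', ' ')
--         if zone is None and p.startswith('ZONE_'):
--             zone = p.replace('ZONE_', '') + ' Zone'
--     parts = [x for x in (age, income, occupation, zone) if x is not None]
--     return ' '.join(parts[:2]) if parts else "Customer Segment"
-- ===== Notes on version B (the rewrite author's own statement) =====
-- stated objective: alternative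
-- what changed: Replaces A's four separate filter passes over the pattern (plus building four intermediate lists) by a single left-to-right pass that remembers the first match of each of the four categories, then emits the parts in the fixed order age, income, occupation, zone.
import Mathlib
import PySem

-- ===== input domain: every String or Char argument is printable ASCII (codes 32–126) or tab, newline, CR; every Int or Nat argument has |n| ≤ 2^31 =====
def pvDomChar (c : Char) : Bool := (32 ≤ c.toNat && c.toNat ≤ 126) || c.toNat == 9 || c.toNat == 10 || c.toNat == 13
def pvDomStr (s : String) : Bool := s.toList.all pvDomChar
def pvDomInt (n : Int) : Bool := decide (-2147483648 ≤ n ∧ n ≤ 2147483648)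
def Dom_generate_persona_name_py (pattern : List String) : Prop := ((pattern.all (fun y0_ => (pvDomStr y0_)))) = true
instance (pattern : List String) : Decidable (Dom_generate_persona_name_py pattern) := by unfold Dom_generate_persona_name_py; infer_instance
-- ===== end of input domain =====

-- B replaces A's four full scans of the pattern by one left-to-right pass that
-- remembers the first match of each category; same return value (objective: simpler/alternative).

-- ===== PORT A =====
def generate_persona_name_py (pattern : List String) : String :=
  let pattern_list := pattern
  let age_terms := pattern_list.filter (fun p => PySem.Str.startswith p "Age_")
  let income_terms := pattern_list.filter (fun p => PySem.Str.startswith p "Income_")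
  let occupation_terms := pattern_list.filter (fun p => PySem.Str.startswith p "PI_OCCUPATION_")
  let zone_terms := pattern_list.filter (fun p => PySem.Str.startswith p "ZONE_")
  let name_parts : List String := []
  let name_parts := if age_terms.isEmpty then name_parts else
    name_parts ++ [PySem.Str.replace age_terms.headI "Age_" ""]
  let name_parts := if income_terms.isEmpty then name_parts else
    name_parts ++ [PySem.Str.replace income_terms.headI "Income_" "" ++ " Income"]
  let name_parts := if occupation_terms.isEmpty then name_parts else
    name_parts ++ [PySem.Str.replace (PySem.Str.replace occupation_terms.headI "PI_OCCUPATION_" "") "_" " "]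
  let name_parts := if zone_terms.isEmpty then name_parts else
    name_parts ++ [PySem.Str.replace zone_terms.headI "ZONE_" "" ++ " Zone"]
  if name_parts.isEmpty then "Customer Segment"
  else PySem.Str.join " " (PySem.List.slice name_parts none (some 2))

-- ===== PORT B =====
def generate_persona_name_py_alt (pattern : List String) : String :=
  let st := pattern.foldl
    (fun (s : Option String × Option String × Option String × Option String) p =>
      ((if s.1.isNone && PySem.Str.startswith p "Age_" then
          some (PySem.Str.replace p "Age_" "") else s.1),
       (if s.2.1.isNone && PySem.Str.startswith p "Income_" then
          some (PySem.Str.replace p "Income_" "" ++ " Income") else s.2.1),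
       (if s.2.2.1.isNone && PySem.Str.startswith p "PI_OCCUPATION_" then
          some (PySem.Str.replace (PySem.Str.replace p "PI_OCCUPATION_" "") "_" " ") else s.2.2.1),
       (if s.2.2.2.isNone && PySem.Str.startswith p "ZONE_" then
          some (PySem.Str.replace p "ZONE_" "" ++ " Zone") else s.2.2.2)))
    (none, none, none, none)
  let parts := ([st.1, st.2.1, st.2.2.1, st.2.2.2] : List (Option String)).filterMap id
  if parts.isEmpty then "Customer Segment"
  else PySem.Str.join " " (parts.take 2)

-- ===== PRECONDITION & SPEC =====
def Spec_generate_persona_name_py (pattern : List String) (out : String) : Prop := out = generate_persona_name_py_alt pattern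
instance (pattern : List String) (out : String) : Decidable (Spec_generate_persona_name_py pattern out) := by unfold Spec_generate_persona_name_py; infer_instance

-- ===== CLAIM (what is proved, stated in full; the proofs are below) =====
def Claim_equal_generate_persona_name_py : Prop := ∀ (pattern : List String), Dom_generate_persona_name_py pattern → Spec_generate_persona_name_py pattern (generate_persona_name_py pattern)

-- ===== LEMMAS AND PROOFS =====

-- The tuple fold of B splits into four independent one-option folds.
def pvUpd (sw : String → Bool) (fmt : String → String) (s : Option String) (p : String) : Option String :=
  if s.isNone && sw p then some (fmt p) else s

theorem pvFoldUpd (sw : String → Bool) (fmt : String → String) (l : List String) (s : Option String) :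
    l.foldl (pvUpd sw fmt) s = s.or (((l.filter sw).head?).map fmt) := by
  induction l generalizing s with
  | nil => cases s <;> simp
  | cons p t ih =>
    cases s with
    | some a => simp [List.foldl_cons, pvUpd, ih]
    | none =>
      by_cases h : sw p
      · simp [List.foldl_cons, pvUpd, h, ih]
      · simp [List.foldl_cons, pvUpd, h, ih]

theorem pvFoldSplit (g1 g2 g3 g4 : Option String → String → Option String) (l : List String)
    (a b c d : Option String) :
    l.foldl (fun (s : Option String × Option String × Option String × Option String) p =>
      (g1 s.1 p, g2 s.2.1 p, g3 s.2.2.1 p, g4 s.2.2.2 p)) (a, b, c, d)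
    = (l.foldl g1 a, l.foldl g2 b, l.foldl g3 c, l.foldl g4 d) := by
  induction l generalizing a b c d with
  | nil => rfl
  | cons p t ih => simp [List.foldl_cons, ih]

-- ===== VERDICT (by name: the statement is the Claim_ definition above) =====
theorem generate_persona_name_py_spec : Claim_equal_generate_persona_name_py := by
  intro pattern _
  unfold Spec_generate_persona_name_py generate_persona_name_py generate_persona_name_py_alt
  rw [show (fun (s : Option String × Option String × Option String × Option String) p =>
      ((if s.1.isNone && PySem.Str.startswith p "Age_" then
          some (PySem.Str.replace p "Age_" "") else s.1),
       (if s.2.1.isNone && PySem.Str.startswith p "Income_" then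
          some (PySem.Str.replace p "Income_" "" ++ " Income") else s.2.1),
       (if s.2.2.1.isNone && PySem.Str.startswith p "PI_OCCUPATION_" then
          some (PySem.Str.replace (PySem.Str.replace p "PI_OCCUPATION_" "") "_" " ") else s.2.2.1),
       (if s.2.2.2.isNone && PySem.Str.startswith p "ZONE_" then
          some (PySem.Str.replace p "ZONE_" "" ++ " Zone") else s.2.2.2)))
    = (fun s p => (pvUpd (fun p => PySem.Str.startswith p "Age_") (fun p => PySem.Str.replace p "Age_" "") s.1 p,
        pvUpd (fun p => PySem.Str.startswith p "Income_") (fun p => PySem.Str.replace p "Income_" "" ++ " Income") s.2.1 p,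
        pvUpd (fun p => PySem.Str.startswith p "PI_OCCUPATION_") (fun p => PySem.Str.replace (PySem.Str.replace p "PI_OCCUPATION_" "") "_" " ") s.2.2.1 p,
        pvUpd (fun p => PySem.Str.startswith p "ZONE_") (fun p => PySem.Str.replace p "ZONE_" "" ++ " Zone") s.2.2.2 p)) from rfl]
  rw [pvFoldSplit]
  rw [pvFoldUpd, pvFoldUpd, pvFoldUpd, pvFoldUpd]
  cases h1 : pattern.filter (fun p => PySem.Str.startswith p "Age_") with
  | nil => ?_ | cons x1 t1 => ?_
  all_goals cases h2 : pattern.filter (fun p => PySem.Str.startswith p "Income_") with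
  | nil => ?_ | cons x2 t2 => ?_
  all_goals cases h3 : pattern.filter (fun p => PySem.Str.startswith p "PI_OCCUPATION_") with
  | nil => ?_ | cons x3 t3 => ?_
  all_goals cases h4 : pattern.filter (fun p => PySem.Str.startswith p "ZONE_") with
  | nil => ?_ | cons x4 t4 => ?_
  all_goals simp only [h1, h2, h3, h4]
  all_goals simp [PySem.List.slice]
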